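-- pv_equiv track=rewrite | github.com/BioComputingUP/FLIPPER | util_functions.py | gap_fill
-- ===== SOURCE A (Python) =====
-- def gap_fill(chain_pred, g=0):
-- 	# if g = 0 retur the predictions as they are
-- 	if(g == 0):
-- 		return chain_pred
-- 	# start with the positives
-- 	for index in range(len(chain_pred)):
-- 		# if the residue in index position is positive
-- 		if chain_pred[index] == 1:
-- 			# init count with one residue
-- 			count = 1
-- 			#start from residue to the left
-- 			i = index - 1
-- 			# while the index is inside the chain and the prediction is 1 and the count is less or equal to g
-- 			while i >= 0 and chain_pred[i] == 1 and count <= g: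
-- 				# increment count and move left
-- 				count += 1
-- 				i -= 1
-- 			# then go right
-- 			i = index + 1
-- 			# while the index is inside the chain and the prediction is 1 and the count is less or equal to g (can be greater already)
-- 			while i < len(chain_pred) and chain_pred[i] == 1 and count <= g:
-- 				# increment count and move right
-- 				count += 1
-- 				i += 1
-- 			# if the count is less or equal to g, it is a gap
-- 			if count <= g:
-- 				chain_pred[index] = 0
-- 	# for negatives is a little bit different (if at beginning or end it is not a gap)
-- 	for index in range(len(chain_pred)):
-- 		# if the residue in index position is negative
-- 		if chain_pred[index] == 0:
-- 			# init count with one residue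
-- 			count = 1
-- 			#start from residue to the left
-- 			i = index - 1
-- 			# while the index is inside the chain and the prediction is 0 and the count is less or equal to g
-- 			while i >= 0 and chain_pred[i] == 0 and count <= g:
-- 				# increment count and move left
-- 				count += 1
-- 				i -= 1
-- 			# if the beginning has been reach i should be equal to -1. then leave the 0 as it is
-- 			if i < 0:
-- 				continue
-- 			# then go right
-- 			i = index + 1
-- 			# while the index is inside the chain and the prediction is 0 and the count is less or equal to g
-- 			while i < len(chain_pred) and chain_pred[i] == 0 and count <= g:
-- 				# increment count and move right
-- 				count += 1
-- 				i += 1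
-- 			# if the end has been reach i should be equal to len(chain_pred). then leave the 0 as it is
-- 			if i >= len(chain_pred):
-- 				continue
-- 			# if beginning and end not reached and g is less or equal to gap number, set prediction to 1
-- 			if count <= g:
-- 				chain_pred[index] = 1
-- 	# return the gap_filled predictions
-- 	return chain_pred
-- ===== SOURCE B (Python) =====
-- # Run-length-encoding re-implementation: one pass to build runs, drop short 1-runs,
-- # merge, fill short interior 0-runs, decode. A mutates chain_pred in place; B does not
-- # (equivalence is about the return value).
--
-- def _rle(xs):
--     runs = []
--     if not xs:
--         return runs
--     v, k = xs[0], 1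
--     for x in xs[1:]:
--         if x == v:
--             k += 1
--         else:
--             runs.append((v, k))
--             v, k = x, 1
--     runs.append((v, k))
--     return runs
--
--
-- def _merge(runs):
--     out = []
--     if not runs:
--         return out
--     v, k = runs[0]
--     for w, m in runs[1:]:
--         if w == v:
--             k += m
--         else:
--             out.append((v, k))
--             v, k = w, m
--     out.append((v, k))
--     return out
--
--
-- def _fill(runs, g):
--     # fill short interior 0-runs: never the first run, never the last
--     if not runs:
--         return []
--     out = [runs[0]]
--     rest = runs[1:]
--     for j, (v, k) in enumerate(rest):
--         if v == 0 and k <= g and j != len(rest) - 1: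
--             out.append((1, k))
--         else:
--             out.append((v, k))
--     return out
--
--
-- def gap_fill(chain_pred, g=0):
--     runs = [(0, k) if v == 1 and k <= g else (v, k) for (v, k) in _rle(chain_pred)]
--     filled = _fill(_merge(runs), g)
--     return [v for (v, k) in filled for _ in range(k)]
-- ===== Notes on version B (the rewrite author's own statement) =====
-- stated objective: alternative
-- what changed: Replaces A's in-place per-index neighbour scans (which re-count each run once per element of the run) by a single run-length-encoding pipeline: encode, drop 1-runs of length <= g, merge adjacent equal runs, fill interior 0-runs of length <= g, decode; A mutates chain_pred in place, B does not.
import Mathlib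
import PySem

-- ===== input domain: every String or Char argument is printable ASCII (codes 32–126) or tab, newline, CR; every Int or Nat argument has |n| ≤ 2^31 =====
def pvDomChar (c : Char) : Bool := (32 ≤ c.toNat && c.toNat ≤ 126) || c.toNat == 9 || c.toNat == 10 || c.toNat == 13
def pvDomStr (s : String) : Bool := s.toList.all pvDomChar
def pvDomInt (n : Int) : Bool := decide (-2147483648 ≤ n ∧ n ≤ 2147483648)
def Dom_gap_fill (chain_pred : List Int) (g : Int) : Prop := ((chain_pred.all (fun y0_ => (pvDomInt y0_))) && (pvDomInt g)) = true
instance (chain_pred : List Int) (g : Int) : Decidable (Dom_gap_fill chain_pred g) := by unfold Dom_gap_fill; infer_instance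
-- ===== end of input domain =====

-- B replaces A's per-index neighbour scans by one run-length-encoding pass (drop short
-- 1-runs, merge, fill short interior 0-runs, decode); A mutates chain_pred in place,
-- B does not — the equivalence proved here is about the return value.

-- ===== PORT A =====
-- the `while i >= 0 and chain_pred[i] == v and count <= g` loop (fuel bounds iterations;
-- fuel = len(chain_pred) is always enough, the index moves one step per iteration)
def gfScanL (s : List Int) (v g : Int) : Nat → Int → Int → Int × Int
  | 0, i, c => (i, c)
  | f + 1, i, c =>
    if 0 ≤ i ∧ PySem.List.pyGet? s i = some v ∧ c ≤ g then
      gfScanL s v g f (i - 1) (c + 1)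
    else (i, c)

-- the `while i < len(chain_pred) and chain_pred[i] == v and count <= g` loop
def gfScanR (s : List Int) (v g : Int) : Nat → Int → Int → Int × Int
  | 0, i, c => (i, c)
  | f + 1, i, c =>
    if i < (s.length : Int) ∧ PySem.List.pyGet? s i = some v ∧ c ≤ g then
      gfScanR s v g f (i + 1) (c + 1)
    else (i, c)

-- body of A's first `for index in range(len(chain_pred))` loop
def gfStep1 (g : Int) (s : List Int) (index : Nat) : List Int :=
  if PySem.List.pyGet? s (index : Int) = some 1 then
    let p := gfScanL s 1 g s.length ((index : Int) - 1) 1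
    let q := gfScanR s 1 g s.length ((index : Int) + 1) p.2
    if q.2 ≤ g then s.set index 0 else s
  else s

-- body of A's second `for index in range(len(chain_pred))` loop (with the two `continue`s)
def gfStep2 (g : Int) (s : List Int) (index : Nat) : List Int :=
  if PySem.List.pyGet? s (index : Int) = some 0 then
    let p := gfScanL s 0 g s.length ((index : Int) - 1) 1
    if p.1 < 0 then s
    else
      let q := gfScanR s 0 g s.length ((index : Int) + 1) p.2
      if (s.length : Int) ≤ q.1 then s
      else if q.2 ≤ g then s.set index 1 else s
  else s

def gap_fill (chain_pred : List Int) (g : Int) : List Int :=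
  if g = 0 then chain_pred
  else
    let l1 := (List.range chain_pred.length).foldl (gfStep1 g) chain_pred
    (List.range l1.length).foldl (gfStep2 g) l1

-- ===== PORT B =====
-- run-length encoding with a pending (value, count) pair (B's _rle loop)
def gfRleGo (v : Int) (k : Nat) : List Int → List (Int × Nat)
  | [] => [(v, k)]
  | x :: xs => if x = v then gfRleGo v (k + 1) xs else (v, k) :: gfRleGo x 1 xs

def gfRle : List Int → List (Int × Nat)
  | [] => []
  | x :: xs => gfRleGo x 1 xs

-- merge adjacent runs of equal value (B's _merge loop)
def gfMergeGo (v : Int) (k : Nat) : List (Int × Nat) → List (Int × Nat)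
  | [] => [(v, k)]
  | r :: rs => if r.1 = v then gfMergeGo v (k + r.2) rs else (v, k) :: gfMergeGo r.1 r.2 rs

def gfMerge : List (Int × Nat) → List (Int × Nat)
  | [] => []
  | r :: rs => gfMergeGo r.1 r.2 rs

-- B's comprehension dropping short 1-runs
def gfDrop (g : Int) (rs : List (Int × Nat)) : List (Int × Nat) :=
  rs.map fun r => if r.1 = 1 ∧ (r.2 : Int) ≤ g then (0, r.2) else r

-- B's _fill_interior: fill short 0-runs except the last run of the tail
def gfFillGo (g : Int) : List (Int × Nat) → List (Int × Nat)
  | [] => []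
  | [r] => [r]
  | r :: rs => (if r.1 = 0 ∧ (r.2 : Int) ≤ g then (1, r.2) else r) :: gfFillGo g rs

-- B's _fill: keep the first run, fill the rest except its last element
def gfFill (g : Int) (rs : List (Int × Nat)) : List (Int × Nat) :=
  match rs with
  | [] => []
  | r :: rest => r :: gfFillGo g rest

def gap_fill_alt (chain_pred : List Int) (g : Int) : List Int :=
  let filled := gfFill g (gfMerge (gfDrop g (gfRle chain_pred)))
  filled.flatMap fun r => List.replicate r.2 r.1

-- ===== PRECONDITION & SPEC =====
def Spec_gap_fill (chain_pred : List Int) (g : Int) (out : List Int) : Prop := out = gap_fill_alt chain_pred g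
instance (chain_pred : List Int) (g : Int) (out : List Int) : Decidable (Spec_gap_fill chain_pred g out) := by unfold Spec_gap_fill; infer_instance

-- ===== CLAIM (what is proved, stated in full; the proofs are below) =====
def Claim_equal_gap_fill : Prop := ∀ (chain_pred : List Int) (g : Int), Dom_gap_fill chain_pred g → Spec_gap_fill chain_pred g (gap_fill chain_pred g)

-- ===== LEMMAS AND PROOFS =====

-- ---------- proof-side abbreviations ----------

-- the indices [a, a+m) as A's for-loop visits them
def gfBlk (a m : Nat) : List Nat := (List.range m).map (a + ·)

def gfDecode (rs : List (Int × Nat)) : List Int := rs.flatMap fun r => List.replicate r.2 r.1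

-- ---------- generic small lemmas ----------

theorem gfBlk_zero (a : Nat) : gfBlk a 0 = [] := rfl

theorem gfBlk_succ (a m : Nat) : gfBlk a (m + 1) = a :: gfBlk (a + 1) m := by
  simp [gfBlk, List.range_succ_eq_map, List.map_map, Function.comp_def]
  intro i _; omega

theorem gfBlk_add (a m t : Nat) : gfBlk a (m + t) = gfBlk a m ++ gfBlk (a + m) t := by
  simp [gfBlk, List.range_add, List.map_map, Function.comp_def]
  intro i _; omega

theorem gfBlk_mem {i a m : Nat} (h : i ∈ gfBlk a m) : ∃ j, j < m ∧ i = a + j := by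
  simp [gfBlk] at h
  obtain ⟨j, hj, rfl⟩ := h
  exact ⟨j, hj, rfl⟩

theorem gfFoldl_fix {α β : Type} (f : α → β → α) (s : α) :
    ∀ idxs : List β, (∀ i ∈ idxs, f s i = s) → idxs.foldl f s = s := by
  intro idxs
  induction idxs with
  | nil => intro _; rfl
  | cons x xs ih =>
    intro h
    simp only [List.foldl_cons, h x (List.mem_cons_self)]
    exact ih (fun i hi => h i (List.mem_cons_of_mem _ hi))

theorem gfDecode_nil : gfDecode [] = [] := rfl

theorem gfDecode_cons (v : Int) (k : Nat) (rs : List (Int × Nat)) :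
    gfDecode ((v, k) :: rs) = List.replicate k v ++ gfDecode rs := by
  simp [gfDecode]

-- ---------- pyGet? on a pre ++ mid ++ suf window ----------

theorem gfGetMid (pre mid suf : List Int) (u : Nat) (hu : u < mid.length) :
    PySem.List.pyGet? (pre ++ mid ++ suf) ((pre.length : Int) + u) = some mid[u] := by
  have h1 : ((pre.length : Int) + u) = ((pre.length + u : Nat) : Int) := by push_cast; ring
  rw [h1, PySem.List.pyGet?_natCast]
  rw [List.append_assoc, List.getElem?_append_right (by omega)]
  have h2 : pre.length + u - pre.length = u := by omega
  rw [h2, List.getElem?_append_left hu, List.getElem?_eq_getElem hu]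

theorem gfGetPreLast (pre suf : List Int) (hne : pre ≠ []) :
    PySem.List.pyGet? (pre ++ suf) ((pre.length : Int) - 1) = pre.getLast? := by
  have hl : 0 < pre.length := List.length_pos_iff.mpr hne
  have h1 : ((pre.length : Int) - 1) = ((pre.length - 1 : Nat) : Int) := by omega
  rw [h1, PySem.List.pyGet?_natCast, List.getElem?_append_left (by omega),
    List.getLast?_eq_getElem?]

theorem gfGet_lt_length {s : List Int} {i : Int} {x : Int} (h0 : 0 ≤ i)
    (h : PySem.List.pyGet? s i = some x) : i < (s.length : Int) := by
  rw [PySem.List.pyGet?_of_nonneg s h0] at h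
  obtain ⟨hlt, -⟩ := List.getElem?_eq_some_iff.mp h
  omega

-- ---------- closed forms for A's while-loops ----------

theorem gfScanL_stop {s : List Int} {v g : Int} (f : Nat) {i c : Int}
    (h : ¬(0 ≤ i ∧ PySem.List.pyGet? s i = some v ∧ c ≤ g)) :
    gfScanL s v g f i c = (i, c) := by
  cases f <;> simp [gfScanL, h]

theorem gfScanR_stop {s : List Int} {v g : Int} (f : Nat) {i c : Int}
    (h : ¬(i < (s.length : Int) ∧ PySem.List.pyGet? s i = some v ∧ c ≤ g)) :
    gfScanR s v g f i c = (i, c) := by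
  cases f <;> simp [gfScanR, h]

theorem gfScanL_run {s : List Int} {v g : Int} :
    ∀ (t f : Nat) (p c : Int), t ≤ f →
      (∀ u : Nat, u < t → 0 ≤ p - u ∧ PySem.List.pyGet? s (p - u) = some v) →
      (p - t < 0 ∨ PySem.List.pyGet? s (p - t) ≠ some v) →
      c + t ≤ g + 1 →
      gfScanL s v g f p c = (p - t, c + t) := by
  intro t
  induction t with
  | zero =>
    intro f p c _ _ hstop _
    have : ¬(0 ≤ p ∧ PySem.List.pyGet? s p = some v ∧ c ≤ g) := by
      rcases hstop with h | h
      · intro hc; omega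
      · intro hc; exact h (by simpa using hc.2.1)
    simpa using gfScanL_stop f this
  | succ t ih =>
    intro f p c hf hrun hstop hcnt
    obtain ⟨f', rfl⟩ : ∃ f', f = f' + 1 := ⟨f - 1, by omega⟩
    have h0 := hrun 0 (by omega)
    simp only [Nat.cast_zero, sub_zero] at h0
    have hcond : 0 ≤ p ∧ PySem.List.pyGet? s p = some v ∧ c ≤ g :=
      ⟨h0.1, h0.2, by push_cast at hcnt; omega⟩
    rw [gfScanL, if_pos hcond]
    have hrec := ih f' (p - 1) (c + 1) (by omega)
      (fun u hu => by
        have h := hrun (u + 1) (by omega)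
        have e : p - 1 - (u : Int) = p - (((u + 1 : Nat)) : Int) := by push_cast; ring
        rw [e]; exact h)
      (by
        have e : p - 1 - (t : Int) = p - (((t + 1 : Nat)) : Int) := by push_cast; ring
        rw [e]; exact hstop)
      (by push_cast at hcnt ⊢; omega)
    rw [hrec, Prod.mk.injEq]
    constructor <;> push_cast <;> ring

theorem gfScanL_cap {s : List Int} {v g : Int} :
    ∀ (t f : Nat) (p c : Int), t ≤ f →
      (∀ u : Nat, u < t → 0 ≤ p - u ∧ PySem.List.pyGet? s (p - u) = some v) →
      c ≤ g + 1 → g + 1 < c + t →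
      gfScanL s v g f p c = (p - (g + 1 - c), g + 1) := by
  intro t
  induction t with
  | zero => intro f p c _ _ hc hlt; exfalso; push_cast at hlt; omega
  | succ t ih =>
    intro f p c hf hrun hc hlt
    obtain ⟨f', rfl⟩ : ∃ f', f = f' + 1 := ⟨f - 1, by omega⟩
    by_cases hceq : c = g + 1
    · have : ¬(0 ≤ p ∧ PySem.List.pyGet? s p = some v ∧ c ≤ g) := by intro hx; omega
      rw [gfScanL_stop (f' + 1) this, hceq]
      simp
    · have h0 := hrun 0 (by omega)
      simp only [Nat.cast_zero, sub_zero] at h0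
      have hcond : 0 ≤ p ∧ PySem.List.pyGet? s p = some v ∧ c ≤ g := ⟨h0.1, h0.2, by omega⟩
      rw [gfScanL, if_pos hcond]
      by_cases ht : g + 1 < (c + 1) + (t : Int)
      · have hrec := ih f' (p - 1) (c + 1) (by omega)
          (fun u hu => by
            have h := hrun (u + 1) (by omega)
            have e : p - 1 - (u : Int) = p - (((u + 1 : Nat)) : Int) := by push_cast; ring
            rw [e]; exact h)
          (by omega) ht
        rw [hrec, Prod.mk.injEq]
        constructor
        · ring
        · rfl
      · exfalso; push_cast at hlt ht; omega

theorem gfScanR_run {s : List Int} {v g : Int} :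
    ∀ (t f : Nat) (p c : Int), t ≤ f → 0 ≤ p →
      (∀ u : Nat, u < t → PySem.List.pyGet? s (p + u) = some v) →
      ((s.length : Int) ≤ p + t ∨ PySem.List.pyGet? s (p + t) ≠ some v) →
      c + t ≤ g + 1 →
      gfScanR s v g f p c = (p + t, c + t) := by
  intro t
  induction t with
  | zero =>
    intro f p c _ _ _ hstop _
    have : ¬(p < (s.length : Int) ∧ PySem.List.pyGet? s p = some v ∧ c ≤ g) := by
      rcases hstop with h | h
      · intro hc; omega
      · intro hc; exact h (by simpa using hc.2.1)
    simpa using gfScanR_stop f this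
  | succ t ih =>
    intro f p c hf hp hrun hstop hcnt
    obtain ⟨f', rfl⟩ : ∃ f', f = f' + 1 := ⟨f - 1, by omega⟩
    have h0 := hrun 0 (by omega)
    simp only [Nat.cast_zero, add_zero] at h0
    have hcond : p < (s.length : Int) ∧ PySem.List.pyGet? s p = some v ∧ c ≤ g :=
      ⟨gfGet_lt_length hp h0, h0, by push_cast at hcnt; omega⟩
    rw [gfScanR, if_pos hcond]
    have hrec := ih f' (p + 1) (c + 1) (by omega) (by omega)
      (fun u hu => by
        have h := hrun (u + 1) (by omega)
        have e : p + 1 + (u : Int) = p + (((u + 1 : Nat)) : Int) := by push_cast; ring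
        rw [e]; exact h)
      (by
        have e : p + 1 + (t : Int) = p + (((t + 1 : Nat)) : Int) := by push_cast; ring
        rw [e]; exact hstop)
      (by push_cast at hcnt ⊢; omega)
    rw [hrec, Prod.mk.injEq]
    constructor <;> push_cast <;> ring

theorem gfScanR_cap {s : List Int} {v g : Int} :
    ∀ (t f : Nat) (p c : Int), t ≤ f → 0 ≤ p →
      (∀ u : Nat, u < t → PySem.List.pyGet? s (p + u) = some v) →
      c ≤ g + 1 → g + 1 < c + t →
      gfScanR s v g f p c = (p + (g + 1 - c), g + 1) := by
  intro t
  induction t with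
  | zero => intro f p c _ _ _ hc hlt; exfalso; push_cast at hlt; omega
  | succ t ih =>
    intro f p c hf hp hrun hc hlt
    obtain ⟨f', rfl⟩ : ∃ f', f = f' + 1 := ⟨f - 1, by omega⟩
    by_cases hceq : c = g + 1
    · have : ¬(p < (s.length : Int) ∧ PySem.List.pyGet? s p = some v ∧ c ≤ g) := by
        intro hx; omega
      rw [gfScanR_stop (f' + 1) this, hceq]
      simp
    · have h0 := hrun 0 (by omega)
      simp only [Nat.cast_zero, add_zero] at h0
      have hcond : p < (s.length : Int) ∧ PySem.List.pyGet? s p = some v ∧ c ≤ g :=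
        ⟨gfGet_lt_length hp h0, h0, by omega⟩
      rw [gfScanR, if_pos hcond]
      by_cases ht : g + 1 < (c + 1) + (t : Int)
      · have hrec := ih f' (p + 1) (c + 1) (by omega) (by omega)
          (fun u hu => by
            have h := hrun (u + 1) (by omega)
            have e : p + 1 + (u : Int) = p + (((u + 1 : Nat)) : Int) := by push_cast; ring
            rw [e]; exact h)
          (by omega) ht
        rw [hrec, Prod.mk.injEq]
        constructor
        · ring
        · rfl
      · exfalso; push_cast at hlt ht; omega
-- ---------- get-facts for a pre ++ replicate m v ++ suf window ----------

theorem gfRunGet (pre suf : List Int) (v : Int) (m u : Nat) (hu : u < m) :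
    PySem.List.pyGet? (pre ++ List.replicate m v ++ suf) ((pre.length : Int) + u) = some v := by
  have h := gfGetMid pre (List.replicate m v) suf u (by simpa using hu)
  simpa using h

theorem gfRunGet0 (pre suf : List Int) (v : Int) (m : Nat) (hm : 0 < m) :
    PySem.List.pyGet? (pre ++ List.replicate m v ++ suf) ((pre.length : Int)) = some v := by
  have h := gfRunGet pre suf v m 0 hm
  simpa using h

theorem gfGetAfter (pre suf : List Int) (v : Int) (m : Nat) :
    PySem.List.pyGet? (pre ++ List.replicate m v ++ suf) ((pre.length : Int) + m) = suf.head? := by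
  have h1 : ((pre.length : Int) + m) = ((pre.length + m : Nat) : Int) := by push_cast; ring
  rw [h1, PySem.List.pyGet?_natCast, List.getElem?_append_right (by simp)]
  simp [List.head?_eq_getElem?]

theorem gfWinLen (pre suf : List Int) (v : Int) (m : Nat) :
    (pre ++ List.replicate m v ++ suf).length = pre.length + m + suf.length := by
  simp; omega

theorem gfWinLast (pre suf : List Int) (v : Int) (m : Nat) (hpre : pre ≠ []) :
    PySem.List.pyGet? (pre ++ List.replicate m v ++ suf) ((pre.length : Int) - 1)
      = pre.getLast? := by
  rw [List.append_assoc]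
  exact gfGetPreLast pre _ hpre

theorem gfWinSet (pre suf : List Int) (v w : Int) (m : Nat) :
    (pre ++ List.replicate (m + 1) v ++ suf).set pre.length w
      = (pre ++ [w]) ++ List.replicate m v ++ suf := by
  rw [List.set_append, if_pos (by simp)]
  rw [List.set_append, if_neg (by omega)]
  simp [List.replicate_succ, List.append_assoc]

-- ---------- pass 1, inner lemmas ----------

-- a run of 1s of length ≤ g is zeroed left to right
theorem gfInner1_short (g : Int) :
    ∀ (m : Nat) (pre suf : List Int), pre.getLast? ≠ some 1 → suf.head? ≠ some 1 →
      ((m : Int)) ≤ g →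
      (gfBlk pre.length m).foldl (gfStep1 g) (pre ++ List.replicate m 1 ++ suf)
        = pre ++ List.replicate m 0 ++ suf := by
  intro m
  induction m with
  | zero => intro pre suf _ _ _; simp [gfBlk_zero]
  | succ m ih =>
    intro pre suf hpre hsuf hm
    have hlen := gfWinLen pre suf 1 (m + 1)
    have hget := gfRunGet0 pre suf 1 (m + 1) (by omega)
    have hscanL : gfScanL (pre ++ List.replicate (m + 1) 1 ++ suf) 1 g
        (pre ++ List.replicate (m + 1) 1 ++ suf).length ((pre.length : Int) - 1) 1
        = ((pre.length : Int) - 1, 1) := by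
      apply gfScanL_stop
      by_cases hp : pre = []
      · intro hx
        have h1 := hx.1
        rw [hp] at h1
        norm_num at h1
      · intro hx
        rw [gfWinLast pre suf 1 (m + 1) hp] at hx
        exact hpre hx.2.1
    have hscanR := gfScanR_run (s := pre ++ List.replicate (m + 1) 1 ++ suf) (v := 1) (g := g)
      m (pre ++ List.replicate (m + 1) 1 ++ suf).length ((pre.length : Int) + 1) 1
      (by rw [hlen]; omega) (by omega)
      (fun u hu => by
        have e : (pre.length : Int) + 1 + u = (pre.length : Int) + ((u + 1 : Nat) : Int) := by
          push_cast; ring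
        rw [e]
        exact gfRunGet pre suf 1 (m + 1) (u + 1) (by omega))
      (by
        right
        have e : (pre.length : Int) + 1 + m = (pre.length : Int) + ((m + 1 : Nat) : Int) := by
          push_cast; ring
        rw [e, gfGetAfter pre suf 1 (m + 1)]
        exact hsuf)
      (by push_cast at hm ⊢; omega)
    have hstep : gfStep1 g (pre ++ List.replicate (m + 1) 1 ++ suf) pre.length
        = (pre ++ [0]) ++ List.replicate m 1 ++ suf := by
      simp only [gfStep1, hget, if_pos, hscanL, hscanR]
      rw [if_pos (by push_cast at hm ⊢; omega)]
      exact gfWinSet pre suf 1 0 m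
    rw [gfBlk_succ, List.foldl_cons, hstep]
    have hlen' : pre.length + 1 = (pre ++ [0]).length := by simp
    rw [hlen']
    rw [ih (pre ++ [0]) suf (by simp) hsuf (by push_cast at hm ⊢; omega)]
    simp [List.replicate_succ]
-- ---------- step-evaluation helpers ----------

theorem gfStep1_skip {g : Int} {s : List Int} {idx : Nat}
    (h : ¬ PySem.List.pyGet? s (idx : Int) = some 1) : gfStep1 g s idx = s := by
  simp only [gfStep1]
  rw [if_neg h]

theorem gfStep2_skip {g : Int} {s : List Int} {idx : Nat}
    (h : ¬ PySem.List.pyGet? s (idx : Int) = some 0) : gfStep2 g s idx = s := by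
  simp only [gfStep2]
  rw [if_neg h]

theorem gfStep1_noset {g : Int} {s : List Int} {idx : Nat} {P Q : Int × Int}
    (hget : PySem.List.pyGet? s (idx : Int) = some 1)
    (hL : gfScanL s 1 g s.length ((idx : Int) - 1) 1 = P)
    (hR : gfScanR s 1 g s.length ((idx : Int) + 1) P.2 = Q)
    (hc : ¬ Q.2 ≤ g) : gfStep1 g s idx = s := by
  simp only [gfStep1, hget, if_pos, hL, hR]
  rw [if_neg hc]

theorem gfStep2_contL {g : Int} {s : List Int} {idx : Nat} {P : Int × Int}
    (hget : PySem.List.pyGet? s (idx : Int) = some 0)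
    (hL : gfScanL s 0 g s.length ((idx : Int) - 1) 1 = P)
    (h1 : P.1 < 0) : gfStep2 g s idx = s := by
  simp only [gfStep2, hget, if_pos, hL]
  rw [if_pos h1]

theorem gfStep2_contR {g : Int} {s : List Int} {idx : Nat} {P Q : Int × Int}
    (hget : PySem.List.pyGet? s (idx : Int) = some 0)
    (hL : gfScanL s 0 g s.length ((idx : Int) - 1) 1 = P)
    (h1 : ¬ P.1 < 0)
    (hR : gfScanR s 0 g s.length ((idx : Int) + 1) P.2 = Q)
    (h2 : (s.length : Int) ≤ Q.1) : gfStep2 g s idx = s := by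
  simp only [gfStep2, hget, if_pos, hL, hR]
  rw [if_neg h1, if_pos h2]

theorem gfStep2_noset {g : Int} {s : List Int} {idx : Nat} {P Q : Int × Int}
    (hget : PySem.List.pyGet? s (idx : Int) = some 0)
    (hL : gfScanL s 0 g s.length ((idx : Int) - 1) 1 = P)
    (h1 : ¬ P.1 < 0)
    (hR : gfScanR s 0 g s.length ((idx : Int) + 1) P.2 = Q)
    (h2 : ¬ (s.length : Int) ≤ Q.1)
    (hc : ¬ Q.2 ≤ g) : gfStep2 g s idx = s := by
  simp only [gfStep2, hget, if_pos, hL, hR]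
  rw [if_neg h1, if_neg h2, if_neg hc]

theorem gfStep2_set {g : Int} {s : List Int} {idx : Nat} {P Q : Int × Int}
    (hget : PySem.List.pyGet? s (idx : Int) = some 0)
    (hL : gfScanL s 0 g s.length ((idx : Int) - 1) 1 = P)
    (h1 : ¬ P.1 < 0)
    (hR : gfScanR s 0 g s.length ((idx : Int) + 1) P.2 = Q)
    (h2 : ¬ (s.length : Int) ≤ Q.1)
    (hc : Q.2 ≤ g) : gfStep2 g s idx = s.set idx 1 := by
  simp only [gfStep2, hget, if_pos, hL, hR]
  rw [if_neg h1, if_neg h2, if_pos hc]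

-- ---------- pass 1: long runs and non-1 runs are left alone ----------

theorem gfInner1_long (g : Int) (k : Nat) (pre suf : List Int)
    (hpre : pre.getLast? ≠ some 1) (hsuf : suf.head? ≠ some 1) (hk : g < (k : Int))
    (j : Nat) (hj : j < k) :
    gfStep1 g (pre ++ List.replicate k 1 ++ suf) (pre.length + j)
      = pre ++ List.replicate k 1 ++ suf := by
  have hlen := gfWinLen pre suf 1 k
  have hget : PySem.List.pyGet? (pre ++ List.replicate k 1 ++ suf) ((pre.length + j : Nat) : Int)
      = some 1 := by
    have e : ((pre.length + j : Nat) : Int) = (pre.length : Int) + (j : Int) := by push_cast; ring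
    rw [e]; exact gfRunGet pre suf 1 k j hj
  have hLrun : ∀ u : Nat, u < j →
      0 ≤ ((pre.length + j : Nat) : Int) - 1 - u ∧
      PySem.List.pyGet? (pre ++ List.replicate k 1 ++ suf) (((pre.length + j : Nat) : Int) - 1 - u)
        = some 1 := by
    intro u hu
    have e : ((pre.length + j : Nat) : Int) - 1 - u = (pre.length : Int) + ((j - 1 - u : Nat) : Int) := by
      push_cast; omega
    rw [e]
    exact ⟨by omega, gfRunGet pre suf 1 k (j - 1 - u) (by omega)⟩
  have hLstopB : ((pre.length + j : Nat) : Int) - 1 - j < 0 ∨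
      PySem.List.pyGet? (pre ++ List.replicate k 1 ++ suf) (((pre.length + j : Nat) : Int) - 1 - j)
        ≠ some 1 := by
    have e : ((pre.length + j : Nat) : Int) - 1 - j = (pre.length : Int) - 1 := by push_cast; ring
    rw [e]
    by_cases hp : pre = []
    · left; rw [hp]; norm_num
    · right; rw [gfWinLast pre suf 1 k hp]; exact hpre
  by_cases hg1 : (1 : Int) ≤ g
  · by_cases hjg : (j : Int) + 1 ≤ g + 1
    · -- the left scan crosses the j ones below and stops at the boundary, count 1+j
      have hL := gfScanL_run (s := pre ++ List.replicate k 1 ++ suf) (v := 1) (g := g)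
        j (pre ++ List.replicate k 1 ++ suf).length (((pre.length + j : Nat) : Int) - 1) 1
        (by omega) hLrun hLstopB (by omega)
      have hRrun : ∀ u : Nat, u < k - 1 - j →
          PySem.List.pyGet? (pre ++ List.replicate k 1 ++ suf)
            (((pre.length + j : Nat) : Int) + 1 + u) = some 1 := by
        intro u hu
        have e : ((pre.length + j : Nat) : Int) + 1 + u
            = (pre.length : Int) + ((j + 1 + u : Nat) : Int) := by push_cast; ring
        rw [e]
        exact gfRunGet pre suf 1 k (j + 1 + u) (by omega)
      by_cases hj1 : (1 : Int) + j ≤ g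
      · by_cases hkg : (k : Int) ≤ g + 1
        · -- the right scan reaches the right boundary, total count k
          have hR := gfScanR_run (s := pre ++ List.replicate k 1 ++ suf) (v := 1) (g := g)
            (k - 1 - j) (pre ++ List.replicate k 1 ++ suf).length
            (((pre.length + j : Nat) : Int) + 1) (1 + (j : Int))
            (by omega) (by omega) hRrun
            (by
              right
              have e : ((pre.length + j : Nat) : Int) + 1 + ((k - 1 - j : Nat) : Int)
                  = (pre.length : Int) + (k : Int) := by push_cast; omega
              rw [e]
              have e2 : ((k : Nat) : Int) = ((k : Nat) : Int) := rfl
              rw [gfGetAfter pre suf 1 k]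
              exact hsuf)
            (by omega)
          exact gfStep1_noset hget hL hR (by simp <;> (omega))
        · -- count caps at g+1 inside the run
          have hR := gfScanR_cap (s := pre ++ List.replicate k 1 ++ suf) (v := 1) (g := g)
            (k - 1 - j) (pre ++ List.replicate k 1 ++ suf).length
            (((pre.length + j : Nat) : Int) + 1) (1 + (j : Int))
            (by omega) (by omega) hRrun (by omega) (by omega)
          exact gfStep1_noset hget hL hR (by simp)
      · -- count after the left scan is already g+1
        have hR := gfScanR_stop (s := pre ++ List.replicate k 1 ++ suf) (v := 1) (g := g)
          (pre ++ List.replicate k 1 ++ suf).length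
          (i := ((pre.length + j : Nat) : Int) + 1) (c := 1 + (j : Int))
          (by intro hx; omega)
        exact gfStep1_noset hget hL hR (by simp <;> omega)
    · -- the left scan alone caps the count at g+1
      have hL := gfScanL_cap (s := pre ++ List.replicate k 1 ++ suf) (v := 1) (g := g)
        j (pre ++ List.replicate k 1 ++ suf).length (((pre.length + j : Nat) : Int) - 1) 1
        (by omega) hLrun (by omega) (by omega)
      have hR := gfScanR_stop (s := pre ++ List.replicate k 1 ++ suf) (v := 1) (g := g)
        (pre ++ List.replicate k 1 ++ suf).length
        (i := ((pre.length + j : Nat) : Int) + 1) (c := g + 1)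
        (by intro hx; omega)
      exact gfStep1_noset hget hL hR (by simp)
  · -- g ≤ 0: both loops stop immediately, count stays 1 > g
    have hL := gfScanL_stop (s := pre ++ List.replicate k 1 ++ suf) (v := 1) (g := g)
      (pre ++ List.replicate k 1 ++ suf).length
      (i := ((pre.length + j : Nat) : Int) - 1) (c := 1) (by intro hx; exact hg1 hx.2.2)
    have hR := gfScanR_stop (s := pre ++ List.replicate k 1 ++ suf) (v := 1) (g := g)
      (pre ++ List.replicate k 1 ++ suf).length
      (i := ((pre.length + j : Nat) : Int) + 1) (c := 1) (by intro hx; exact hg1 hx.2.2)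
    exact gfStep1_noset hget hL hR (by simp <;> omega)
-- ---------- runs: well-formedness ----------

def gfChain (rs : List (Int × Nat)) : Prop := List.IsChain (fun r t => r.1 ≠ t.1) rs
def gfPos (rs : List (Int × Nat)) : Prop := ∀ r ∈ rs, r.2 ≠ 0

theorem gfLastRep (xs : List Int) (v : Int) (k : Nat) (hk : k ≠ 0) :
    (xs ++ List.replicate k v).getLast? = some v := by
  obtain ⟨m, rfl⟩ : ∃ m, k = m + 1 := ⟨k - 1, by omega⟩
  rw [List.getLast?_append_of_ne_nil xs (by simp), List.replicate_succ', List.getLast?_concat]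

theorem gfDecode_head (v : Int) (k : Nat) (t : List (Int × Nat)) (hk : k ≠ 0) :
    (gfDecode ((v, k) :: t)).head? = some v := by
  obtain ⟨m, rfl⟩ : ∃ m, k = m + 1 := ⟨k - 1, by omega⟩
  simp [gfDecode_cons, List.replicate_succ]

-- ---------- pass 1: whole-block lemmas ----------

theorem gfBlock1_skip (g : Int) (k : Nat) (pre suf : List Int) (v : Int) (hv : v ≠ 1) :
    (gfBlk pre.length k).foldl (gfStep1 g) (pre ++ List.replicate k v ++ suf)
      = pre ++ List.replicate k v ++ suf := by
  apply gfFoldl_fix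
  intro i hi
  obtain ⟨j, hj, rfl⟩ := gfBlk_mem hi
  apply gfStep1_skip
  have e : ((pre.length + j : Nat) : Int) = (pre.length : Int) + (j : Int) := by push_cast; ring
  rw [e, gfRunGet pre suf v k j hj]
  simp [hv]

theorem gfBlock1_long (g : Int) (k : Nat) (pre suf : List Int)
    (hpre : pre.getLast? ≠ some 1) (hsuf : suf.head? ≠ some 1) (hk : g < (k : Int)) :
    (gfBlk pre.length k).foldl (gfStep1 g) (pre ++ List.replicate k 1 ++ suf)
      = pre ++ List.replicate k 1 ++ suf := by
  apply gfFoldl_fix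
  intro i hi
  obtain ⟨j, hj, rfl⟩ := gfBlk_mem hi
  exact gfInner1_long g k pre suf hpre hsuf hk j hj

-- ---------- pass 1: the whole loop, by induction on the runs ----------

theorem gfPass1 (g : Int) : ∀ (rs : List (Int × Nat)), gfChain rs → gfPos rs →
    ∀ pre : List Int, (∀ k2, rs.head? = some (1, k2) → pre.getLast? ≠ some 1) →
    (gfBlk pre.length (gfDecode rs).length).foldl (gfStep1 g) (pre ++ gfDecode rs)
      = pre ++ gfDecode (gfDrop g rs) := by
  intro rs
  induction rs with
  | nil => intro _ _ pre _; simp [gfDecode, gfDrop, gfBlk]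
  | cons r rest ih =>
    obtain ⟨v, k⟩ := r
    intro hch hpos pre hpre
    have hk : k ≠ 0 := hpos (v, k) (List.mem_cons_self)
    have hch' : gfChain rest := List.IsChain.of_cons hch
    have hpos' : gfPos rest := fun r hr => hpos r (List.mem_cons_of_mem _ hr)
    have hsuf : (gfDecode rest).head? ≠ some v := by
      cases rest with
      | nil => simp [gfDecode]
      | cons r2 t =>
        obtain ⟨v2, k2⟩ := r2
        rw [gfDecode_head v2 k2 t (hpos' (v2, k2) (List.mem_cons_self))]
        have hne : v ≠ v2 := (List.isChain_cons_cons.mp hch).1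
        simp
        omega
    rw [gfDecode_cons, ← List.append_assoc]
    have hblk : gfBlk pre.length (List.replicate k v ++ gfDecode rest).length
        = gfBlk pre.length k ++ gfBlk (pre.length + k) (gfDecode rest).length := by
      rw [List.length_append, List.length_replicate, gfBlk_add]
    rw [hblk, List.foldl_append]
    by_cases hv : v = 1
    · subst hv
      by_cases hkg : (k : Int) ≤ g
      · rw [gfInner1_short g k pre (gfDecode rest) (hpre k rfl) hsuf hkg]
        have e1 : pre ++ List.replicate k 0 ++ gfDecode rest
            = (pre ++ List.replicate k 0) ++ gfDecode rest := by simp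
        have e2 : pre.length + k = (pre ++ List.replicate k 0).length := by simp
        rw [e1, e2, ih hch' hpos' (pre ++ List.replicate k 0)
          (fun k2 _ => by rw [gfLastRep pre 0 k hk]; simp)]
        have e3 : gfDrop g ((1, k) :: rest) = (0, k) :: gfDrop g rest := by
          simp [gfDrop, hkg]
        rw [e3, gfDecode_cons]
        simp
      · rw [gfBlock1_long g k pre (gfDecode rest) (hpre k rfl) hsuf (by omega)]
        have e1 : pre ++ List.replicate k 1 ++ gfDecode rest
            = (pre ++ List.replicate k 1) ++ gfDecode rest := by simp
        have e2 : pre.length + k = (pre ++ List.replicate k 1).length := by simp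
        rw [e1, e2, ih hch' hpos' (pre ++ List.replicate k 1)
          (fun k2 hh => by
            exfalso
            apply hsuf
            cases rest with
            | nil => simp at hh
            | cons r2 t =>
              obtain ⟨v2, k2'⟩ := r2
              simp at hh
              rw [gfDecode_head v2 k2' t (hpos' (v2, k2') (List.mem_cons_self))]
              rw [hh.1])]
        have e3 : gfDrop g ((1, k) :: rest) = (1, k) :: gfDrop g rest := by
          simp [gfDrop, hkg]
        rw [e3, gfDecode_cons]
        simp
    · rw [gfBlock1_skip g k pre (gfDecode rest) v hv]
      have e1 : pre ++ List.replicate k v ++ gfDecode rest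
          = (pre ++ List.replicate k v) ++ gfDecode rest := by simp
      have e2 : pre.length + k = (pre ++ List.replicate k v).length := by simp
      rw [e1, e2, ih hch' hpos' (pre ++ List.replicate k v)
        (fun k2 _ => by rw [gfLastRep pre v k hk]; simp [hv])]
      have e3 : gfDrop g ((v, k) :: rest) = (v, k) :: gfDrop g rest := by
        simp [gfDrop, hv]
      rw [e3, gfDecode_cons]
      simp
-- ---------- pass 2, inner lemmas ----------

-- a 0-run touching the start of the chain is never filled
theorem gfInner2_start (g : Int) (k : Nat) (suf : List Int) (j : Nat) (hj : j < k) :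
    gfStep2 g (List.replicate k 0 ++ suf) j = List.replicate k 0 ++ suf := by
  have hget : PySem.List.pyGet? (List.replicate k 0 ++ suf) ((j : Nat) : Int) = some 0 := by
    have h := gfRunGet [] suf 0 k j hj
    simpa using h
  have hLrun : ∀ u : Nat, u < j →
      0 ≤ ((j : Nat) : Int) - 1 - u ∧
      PySem.List.pyGet? (List.replicate k 0 ++ suf) (((j : Nat) : Int) - 1 - u) = some 0 := by
    intro u hu
    have h := gfRunGet [] suf 0 k (j - 1 - u) (by omega)
    simp only [List.length_nil, Nat.cast_zero, zero_add, List.nil_append] at h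
    have e : ((j : Nat) : Int) - 1 - u = ((j - 1 - u : Nat) : Int) := by omega
    rw [e]
    exact ⟨by omega, h⟩
  by_cases hg1 : (1 : Int) ≤ g
  · by_cases hjg : (j : Int) + 1 ≤ g + 1
    · -- the left scan reaches index -1: continue
      have hL := gfScanL_run (s := List.replicate k 0 ++ suf) (v := 0) (g := g)
        j (List.replicate k 0 ++ suf).length (((j : Nat) : Int) - 1) 1
        (by simp <;> omega) hLrun (by left; omega) (by omega)
      exact gfStep2_contL hget hL (by simp)
    · -- the left scan caps the count at g+1 with the index still ≥ 0
      have hL := gfScanL_cap (s := List.replicate k 0 ++ suf) (v := 0) (g := g)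
        j (List.replicate k 0 ++ suf).length (((j : Nat) : Int) - 1) 1
        (by simp <;> omega) hLrun (by omega) (by omega)
      have hR := gfScanR_stop (s := List.replicate k 0 ++ suf) (v := 0) (g := g)
        (List.replicate k 0 ++ suf).length
        (i := ((j : Nat) : Int) + 1) (c := g + 1) (by intro hx; omega)
      by_cases hq : ((List.replicate k 0 ++ suf).length : Int) ≤ ((j : Nat) : Int) + 1
      · exact gfStep2_contR hget hL (by simp <;> omega) hR hq
      · exact gfStep2_noset hget hL (by simp <;> omega) hR hq (by simp)
  · -- g ≤ 0: the left scan stops at once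
    have hL := gfScanL_stop (s := List.replicate k 0 ++ suf) (v := 0) (g := g)
      (List.replicate k 0 ++ suf).length
      (i := ((j : Nat) : Int) - 1) (c := 1) (by intro hx; exact hg1 hx.2.2)
    by_cases hj0 : j = 0
    · exact gfStep2_contL hget hL (by simp [hj0])
    · have hR := gfScanR_stop (s := List.replicate k 0 ++ suf) (v := 0) (g := g)
        (List.replicate k 0 ++ suf).length
        (i := ((j : Nat) : Int) + 1) (c := 1) (by intro hx; exact hg1 hx.2.2)
      by_cases hq : ((List.replicate k 0 ++ suf).length : Int) ≤ ((j : Nat) : Int) + 1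
      · exact gfStep2_contR hget hL (by simp <;> omega) hR hq
      · exact gfStep2_noset hget hL (by simp <;> omega) hR hq (by simp <;> omega)

-- a 0-run touching the end of the chain is never filled
theorem gfInner2_end (g : Int) (k : Nat) (pre : List Int)
    (hne : pre ≠ []) (hpre : pre.getLast? ≠ some 0) (j : Nat) (hj : j < k) :
    gfStep2 g (pre ++ List.replicate k 0) (pre.length + j) = pre ++ List.replicate k 0 := by
  have ha : 0 < pre.length := List.length_pos_iff.mpr hne
  have hget : PySem.List.pyGet? (pre ++ List.replicate k 0) ((pre.length + j : Nat) : Int)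
      = some 0 := by
    have h := gfRunGet pre [] 0 k j hj
    have e : ((pre.length + j : Nat) : Int) = (pre.length : Int) + (j : Int) := by push_cast; ring
    rw [e]; simpa using h
  have hLrun : ∀ u : Nat, u < j →
      0 ≤ ((pre.length + j : Nat) : Int) - 1 - u ∧
      PySem.List.pyGet? (pre ++ List.replicate k 0) (((pre.length + j : Nat) : Int) - 1 - u)
        = some 0 := by
    intro u hu
    have h := gfRunGet pre [] 0 k (j - 1 - u) (by omega)
    simp only [List.append_nil] at h
    have e : ((pre.length + j : Nat) : Int) - 1 - u
        = (pre.length : Int) + ((j - 1 - u : Nat) : Int) := by push_cast; omega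
    rw [e]
    exact ⟨by omega, h⟩
  have hlen : (pre ++ List.replicate k 0).length = pre.length + k := by simp
  by_cases hg1 : (1 : Int) ≤ g
  · by_cases hjg : (j : Int) + 1 ≤ g + 1
    · -- left scan stops at the non-zero boundary, index pre.length - 1 ≥ 0
      have hL := gfScanL_run (s := pre ++ List.replicate k 0) (v := 0) (g := g)
        j (pre ++ List.replicate k 0).length (((pre.length + j : Nat) : Int) - 1) 1
        (by omega) hLrun
        (by
          right
          have e : ((pre.length + j : Nat) : Int) - 1 - j = (pre.length : Int) - 1 := by
            push_cast; ring
          rw [e]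
          have h := gfWinLast pre [] 0 k hne
          simp only [List.append_nil] at h
          rw [h]; exact hpre)
        (by omega)
      have hRrun : ∀ u : Nat, u < k - 1 - j →
          PySem.List.pyGet? (pre ++ List.replicate k 0)
            (((pre.length + j : Nat) : Int) + 1 + u) = some 0 := by
        intro u hu
        have h := gfRunGet pre [] 0 k (j + 1 + u) (by omega)
        simp only [List.append_nil] at h
        have e : ((pre.length + j : Nat) : Int) + 1 + u
            = (pre.length : Int) + ((j + 1 + u : Nat) : Int) := by push_cast; ring
        rw [e]; exact h
      by_cases hj1 : (1 : Int) + j ≤ g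
      · by_cases hkg : (k : Int) ≤ g + 1
        · -- right scan runs into the end of the chain: continue
          have hR := gfScanR_run (s := pre ++ List.replicate k 0) (v := 0) (g := g)
            (k - 1 - j) (pre ++ List.replicate k 0).length
            (((pre.length + j : Nat) : Int) + 1) (1 + (j : Int))
            (by omega) (by omega) hRrun
            (by left; rw [hlen]; push_cast; omega)
            (by omega)
          exact gfStep2_contR hget hL (by simp <;> omega) hR (by rw [hlen]; simp; omega)
        · -- count caps at g+1 before the end
          have hR := gfScanR_cap (s := pre ++ List.replicate k 0) (v := 0) (g := g)
            (k - 1 - j) (pre ++ List.replicate k 0).length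
            (((pre.length + j : Nat) : Int) + 1) (1 + (j : Int))
            (by omega) (by omega) hRrun (by omega) (by omega)
          by_cases hq : ((pre ++ List.replicate k 0).length : Int)
              ≤ (((pre.length + j : Nat) : Int) + 1) + (g + 1 - (1 + (j : Int)))
          · exact gfStep2_contR hget hL (by simp <;> omega) hR hq
          · exact gfStep2_noset hget hL (by simp <;> omega) hR hq (by simp)
      · -- count is already g+1 after the left scan
        have hR := gfScanR_stop (s := pre ++ List.replicate k 0) (v := 0) (g := g)
          (pre ++ List.replicate k 0).length
          (i := ((pre.length + j : Nat) : Int) + 1) (c := 1 + (j : Int))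
          (by intro hx; omega)
        by_cases hq : ((pre ++ List.replicate k 0).length : Int)
            ≤ ((pre.length + j : Nat) : Int) + 1
        · exact gfStep2_contR hget hL (by simp <;> omega) hR hq
        · exact gfStep2_noset hget hL (by simp <;> omega) hR hq (by simp <;> omega)
    · -- the left scan caps the count at g+1, index still ≥ 0
      have hL := gfScanL_cap (s := pre ++ List.replicate k 0) (v := 0) (g := g)
        j (pre ++ List.replicate k 0).length (((pre.length + j : Nat) : Int) - 1) 1
        (by omega) hLrun (by omega) (by omega)
      have hR := gfScanR_stop (s := pre ++ List.replicate k 0) (v := 0) (g := g)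
        (pre ++ List.replicate k 0).length
        (i := ((pre.length + j : Nat) : Int) + 1) (c := g + 1)
        (by intro hx; omega)
      by_cases hq : ((pre ++ List.replicate k 0).length : Int)
          ≤ ((pre.length + j : Nat) : Int) + 1
      · exact gfStep2_contR hget hL (by simp <;> omega) hR hq
      · exact gfStep2_noset hget hL (by simp <;> omega) hR hq (by simp)
  · -- g ≤ 0
    have hL := gfScanL_stop (s := pre ++ List.replicate k 0) (v := 0) (g := g)
      (pre ++ List.replicate k 0).length
      (i := ((pre.length + j : Nat) : Int) - 1) (c := 1) (by intro hx; exact hg1 hx.2.2)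
    have hR := gfScanR_stop (s := pre ++ List.replicate k 0) (v := 0) (g := g)
      (pre ++ List.replicate k 0).length
      (i := ((pre.length + j : Nat) : Int) + 1) (c := 1) (by intro hx; exact hg1 hx.2.2)
    by_cases hq : ((pre ++ List.replicate k 0).length : Int)
        ≤ ((pre.length + j : Nat) : Int) + 1
    · exact gfStep2_contR hget hL (by simp <;> omega) hR hq
    · exact gfStep2_noset hget hL (by simp <;> omega) hR hq (by simp <;> omega)
-- an interior 0-run of length ≤ g is filled left to right
theorem gfInner2_short (g : Int) :
    ∀ (m : Nat) (pre suf : List Int), pre ≠ [] → pre.getLast? ≠ some 0 →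
      suf ≠ [] → suf.head? ≠ some 0 → ((m : Int)) ≤ g →
      (gfBlk pre.length m).foldl (gfStep2 g) (pre ++ List.replicate m 0 ++ suf)
        = pre ++ List.replicate m 1 ++ suf := by
  intro m
  induction m with
  | zero => intro pre suf _ _ _ _ _; simp [gfBlk_zero]
  | succ m ih =>
    intro pre suf hne hpre hsufne hsuf hm
    have ha : 0 < pre.length := List.length_pos_iff.mpr hne
    have hsl : 0 < suf.length := List.length_pos_iff.mpr hsufne
    have hlen := gfWinLen pre suf 0 (m + 1)
    have hget := gfRunGet0 pre suf 0 (m + 1) (by omega)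
    have hL : gfScanL (pre ++ List.replicate (m + 1) 0 ++ suf) 0 g
        (pre ++ List.replicate (m + 1) 0 ++ suf).length ((pre.length : Int) - 1) 1
        = ((pre.length : Int) - 1, 1) := by
      apply gfScanL_stop
      intro hx
      rw [gfWinLast pre suf 0 (m + 1) hne] at hx
      exact hpre hx.2.1
    have hR := gfScanR_run (s := pre ++ List.replicate (m + 1) 0 ++ suf) (v := 0) (g := g)
      m (pre ++ List.replicate (m + 1) 0 ++ suf).length ((pre.length : Int) + 1) 1
      (by rw [hlen]; omega) (by omega)
      (fun u hu => by
        have e : (pre.length : Int) + 1 + u = (pre.length : Int) + ((u + 1 : Nat) : Int) := by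
          push_cast; ring
        rw [e]
        exact gfRunGet pre suf 0 (m + 1) (u + 1) (by omega))
      (by
        right
        have e : (pre.length : Int) + 1 + m = (pre.length : Int) + ((m + 1 : Nat) : Int) := by
          push_cast; ring
        rw [e, gfGetAfter pre suf 0 (m + 1)]
        exact hsuf)
      (by push_cast at hm ⊢; omega)
    have hstep : gfStep2 g (pre ++ List.replicate (m + 1) 0 ++ suf) pre.length
        = (pre ++ [1]) ++ List.replicate m 0 ++ suf := by
      rw [gfStep2_set hget hL (by simp <;> omega) hR
        (by rw [hlen]; simp; omega) (by simp; push_cast at hm ⊢; omega)]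
      exact gfWinSet pre suf 0 1 m
    rw [gfBlk_succ, List.foldl_cons, hstep]
    have hlen' : pre.length + 1 = (pre ++ [1]).length := by simp
    rw [hlen']
    rw [ih (pre ++ [1]) suf (by simp) (by simp) hsufne hsuf (by push_cast at hm ⊢; omega)]
    simp [List.replicate_succ]

-- an interior 0-run of length > g is left alone
theorem gfInner2_long (g : Int) (k : Nat) (pre suf : List Int)
    (hne : pre ≠ []) (hpre : pre.getLast? ≠ some 0) (hsuf : suf.head? ≠ some 0)
    (hk : g < (k : Int)) (j : Nat) (hj : j < k) :
    gfStep2 g (pre ++ List.replicate k 0 ++ suf) (pre.length + j)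
      = pre ++ List.replicate k 0 ++ suf := by
  have ha : 0 < pre.length := List.length_pos_iff.mpr hne
  have hlen := gfWinLen pre suf 0 k
  have hget : PySem.List.pyGet? (pre ++ List.replicate k 0 ++ suf) ((pre.length + j : Nat) : Int)
      = some 0 := by
    have e : ((pre.length + j : Nat) : Int) = (pre.length : Int) + (j : Int) := by push_cast; ring
    rw [e]; exact gfRunGet pre suf 0 k j hj
  have hLrun : ∀ u : Nat, u < j →
      0 ≤ ((pre.length + j : Nat) : Int) - 1 - u ∧
      PySem.List.pyGet? (pre ++ List.replicate k 0 ++ suf)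
        (((pre.length + j : Nat) : Int) - 1 - u) = some 0 := by
    intro u hu
    have e : ((pre.length + j : Nat) : Int) - 1 - u
        = (pre.length : Int) + ((j - 1 - u : Nat) : Int) := by push_cast; omega
    rw [e]
    exact ⟨by omega, gfRunGet pre suf 0 k (j - 1 - u) (by omega)⟩
  by_cases hg1 : (1 : Int) ≤ g
  · by_cases hjg : (j : Int) + 1 ≤ g + 1
    · have hL := gfScanL_run (s := pre ++ List.replicate k 0 ++ suf) (v := 0) (g := g)
        j (pre ++ List.replicate k 0 ++ suf).length (((pre.length + j : Nat) : Int) - 1) 1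
        (by omega) hLrun
        (by
          right
          have e : ((pre.length + j : Nat) : Int) - 1 - j = (pre.length : Int) - 1 := by
            push_cast; ring
          rw [e, gfWinLast pre suf 0 k hne]
          exact hpre)
        (by omega)
      have hRrun : ∀ u : Nat, u < k - 1 - j →
          PySem.List.pyGet? (pre ++ List.replicate k 0 ++ suf)
            (((pre.length + j : Nat) : Int) + 1 + u) = some 0 := by
        intro u hu
        have e : ((pre.length + j : Nat) : Int) + 1 + u
            = (pre.length : Int) + ((j + 1 + u : Nat) : Int) := by push_cast; ring
        rw [e]
        exact gfRunGet pre suf 0 k (j + 1 + u) (by omega)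
      by_cases hj1 : (1 : Int) + j ≤ g
      · by_cases hkg : (k : Int) ≤ g + 1
        · have hR := gfScanR_run (s := pre ++ List.replicate k 0 ++ suf) (v := 0) (g := g)
            (k - 1 - j) (pre ++ List.replicate k 0 ++ suf).length
            (((pre.length + j : Nat) : Int) + 1) (1 + (j : Int))
            (by omega) (by omega) hRrun
            (by
              right
              have e : ((pre.length + j : Nat) : Int) + 1 + ((k - 1 - j : Nat) : Int)
                  = (pre.length : Int) + (k : Int) := by push_cast; omega
              rw [e, gfGetAfter pre suf 0 k]
              exact hsuf)
            (by omega)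
          by_cases hq : ((pre ++ List.replicate k 0 ++ suf).length : Int)
              ≤ (((pre.length + j : Nat) : Int) + 1) + ((k - 1 - j : Nat) : Int)
          · exact gfStep2_contR hget hL (by simp <;> omega) hR hq
          · exact gfStep2_noset hget hL (by simp <;> omega) hR hq
              (by simp <;> (omega))
        · have hR := gfScanR_cap (s := pre ++ List.replicate k 0 ++ suf) (v := 0) (g := g)
            (k - 1 - j) (pre ++ List.replicate k 0 ++ suf).length
            (((pre.length + j : Nat) : Int) + 1) (1 + (j : Int))
            (by omega) (by omega) hRrun (by omega) (by omega)
          by_cases hq : ((pre ++ List.replicate k 0 ++ suf).length : Int)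
              ≤ (((pre.length + j : Nat) : Int) + 1) + (g + 1 - (1 + (j : Int)))
          · exact gfStep2_contR hget hL (by simp <;> omega) hR hq
          · exact gfStep2_noset hget hL (by simp <;> omega) hR hq (by simp)
      · have hR := gfScanR_stop (s := pre ++ List.replicate k 0 ++ suf) (v := 0) (g := g)
          (pre ++ List.replicate k 0 ++ suf).length
          (i := ((pre.length + j : Nat) : Int) + 1) (c := 1 + (j : Int))
          (by intro hx; omega)
        by_cases hq : ((pre ++ List.replicate k 0 ++ suf).length : Int)
            ≤ ((pre.length + j : Nat) : Int) + 1
        · exact gfStep2_contR hget hL (by simp <;> omega) hR hq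
        · exact gfStep2_noset hget hL (by simp <;> omega) hR hq (by simp <;> omega)
    · have hL := gfScanL_cap (s := pre ++ List.replicate k 0 ++ suf) (v := 0) (g := g)
        j (pre ++ List.replicate k 0 ++ suf).length (((pre.length + j : Nat) : Int) - 1) 1
        (by omega) hLrun (by omega) (by omega)
      have hR := gfScanR_stop (s := pre ++ List.replicate k 0 ++ suf) (v := 0) (g := g)
        (pre ++ List.replicate k 0 ++ suf).length
        (i := ((pre.length + j : Nat) : Int) + 1) (c := g + 1)
        (by intro hx; omega)
      by_cases hq : ((pre ++ List.replicate k 0 ++ suf).length : Int)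
          ≤ ((pre.length + j : Nat) : Int) + 1
      · exact gfStep2_contR hget hL (by simp <;> omega) hR hq
      · exact gfStep2_noset hget hL (by simp <;> omega) hR hq (by simp)
  · have hL := gfScanL_stop (s := pre ++ List.replicate k 0 ++ suf) (v := 0) (g := g)
      (pre ++ List.replicate k 0 ++ suf).length
      (i := ((pre.length + j : Nat) : Int) - 1) (c := 1) (by intro hx; exact hg1 hx.2.2)
    have hR := gfScanR_stop (s := pre ++ List.replicate k 0 ++ suf) (v := 0) (g := g)
      (pre ++ List.replicate k 0 ++ suf).length
      (i := ((pre.length + j : Nat) : Int) + 1) (c := 1) (by intro hx; exact hg1 hx.2.2)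
    by_cases hq : ((pre ++ List.replicate k 0 ++ suf).length : Int)
        ≤ ((pre.length + j : Nat) : Int) + 1
    · exact gfStep2_contR hget hL (by simp <;> omega) hR hq
    · exact gfStep2_noset hget hL (by simp <;> omega) hR hq (by simp <;> omega)
-- ---------- pass 2: whole-block lemmas ----------

theorem gfBlock2_skip (g : Int) (k : Nat) (pre suf : List Int) (v : Int) (hv : v ≠ 0) :
    (gfBlk pre.length k).foldl (gfStep2 g) (pre ++ List.replicate k v ++ suf)
      = pre ++ List.replicate k v ++ suf := by
  apply gfFoldl_fix
  intro i hi
  obtain ⟨j, hj, rfl⟩ := gfBlk_mem hi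
  apply gfStep2_skip
  have e : ((pre.length + j : Nat) : Int) = (pre.length : Int) + (j : Int) := by push_cast; ring
  rw [e, gfRunGet pre suf v k j hj]
  simp [hv]

theorem gfBlock2_start (g : Int) (k : Nat) (suf : List Int) :
    (gfBlk 0 k).foldl (gfStep2 g) (List.replicate k 0 ++ suf)
      = List.replicate k 0 ++ suf := by
  apply gfFoldl_fix
  intro i hi
  obtain ⟨j, hj, rfl⟩ := gfBlk_mem hi
  have e : 0 + j = j := by omega
  rw [e]
  exact gfInner2_start g k suf j hj

theorem gfBlock2_end (g : Int) (k : Nat) (pre : List Int)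
    (hne : pre ≠ []) (hpre : pre.getLast? ≠ some 0) :
    (gfBlk pre.length k).foldl (gfStep2 g) (pre ++ List.replicate k 0)
      = pre ++ List.replicate k 0 := by
  apply gfFoldl_fix
  intro i hi
  obtain ⟨j, hj, rfl⟩ := gfBlk_mem hi
  exact gfInner2_end g k pre hne hpre j hj

theorem gfBlock2_long (g : Int) (k : Nat) (pre suf : List Int)
    (hne : pre ≠ []) (hpre : pre.getLast? ≠ some 0) (hsuf : suf.head? ≠ some 0)
    (hk : g < (k : Int)) :
    (gfBlk pre.length k).foldl (gfStep2 g) (pre ++ List.replicate k 0 ++ suf)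
      = pre ++ List.replicate k 0 ++ suf := by
  apply gfFoldl_fix
  intro i hi
  obtain ⟨j, hj, rfl⟩ := gfBlk_mem hi
  exact gfInner2_long g k pre suf hne hpre hsuf hk j hj

-- ---------- pass 2: the whole loop after the first run, by induction on the runs ----------

theorem gfDecode_ne_nil (v : Int) (k : Nat) (t : List (Int × Nat)) (hk : k ≠ 0) :
    gfDecode ((v, k) :: t) ≠ [] := by
  intro h
  have hh := gfDecode_head v k t hk
  rw [h] at hh
  simp at hh

theorem gfPass2 (g : Int) : ∀ (rs : List (Int × Nat)), gfChain rs → gfPos rs →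
    ∀ pre : List Int, pre ≠ [] → (∀ k2, rs.head? = some (0, k2) → pre.getLast? ≠ some 0) →
    (gfBlk pre.length (gfDecode rs).length).foldl (gfStep2 g) (pre ++ gfDecode rs)
      = pre ++ gfDecode (gfFillGo g rs) := by
  intro rs
  induction rs with
  | nil => intro _ _ pre _ _; simp [gfDecode, gfFillGo, gfBlk]
  | cons r rest ih =>
    obtain ⟨v, k⟩ := r
    intro hch hpos pre hne hpre
    have hk : k ≠ 0 := hpos (v, k) (List.mem_cons_self)
    have hch' : gfChain rest := List.IsChain.of_cons hch
    have hpos' : gfPos rest := fun r hr => hpos r (List.mem_cons_of_mem _ hr)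
    cases rest with
    | nil =>
      -- last run: a 0-run here touches the end of the chain
      rw [gfDecode_cons, gfDecode_nil, List.append_nil]
      have hblk : gfBlk pre.length (List.replicate k v).length = gfBlk pre.length k := by
        rw [List.length_replicate]
      have hfill : gfFillGo g [(v, k)] = [(v, k)] := rfl
      rw [hblk, hfill, gfDecode_cons, gfDecode_nil, List.append_nil]
      by_cases hv : v = 0
      · subst hv
        have e : pre ++ List.replicate k (0 : Int)
            = pre ++ List.replicate k (0 : Int) ++ [] := by simp
        exact gfBlock2_end g k pre hne (hpre k rfl)
      · have h := gfBlock2_skip g k pre [] v hv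
        simpa using h
    | cons r2 t =>
      obtain ⟨v2, k2⟩ := r2
      have hk2 : k2 ≠ 0 := hpos' (v2, k2) (List.mem_cons_self)
      have hsufne : gfDecode ((v2, k2) :: t) ≠ [] := gfDecode_ne_nil v2 k2 t hk2
      have hv2 : v ≠ v2 := (List.isChain_cons_cons.mp hch).1
      have hsufhead : (gfDecode ((v2, k2) :: t)).head? ≠ some v := by
        rw [gfDecode_head v2 k2 t hk2]
        simp
        omega
      rw [gfDecode_cons, ← List.append_assoc]
      have hblk : gfBlk pre.length (List.replicate k v ++ gfDecode ((v2, k2) :: t)).length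
          = gfBlk pre.length k ++ gfBlk (pre.length + k) (gfDecode ((v2, k2) :: t)).length := by
        rw [List.length_append, List.length_replicate, gfBlk_add]
      rw [hblk, List.foldl_append]
      by_cases hv : v = 0
      · subst hv
        by_cases hkg : (k : Int) ≤ g
        · rw [gfInner2_short g k pre (gfDecode ((v2, k2) :: t)) hne (hpre k rfl) hsufne
            (by rw [gfDecode_head v2 k2 t hk2]; simp; omega) hkg]
          have e1 : pre ++ List.replicate k 1 ++ gfDecode ((v2, k2) :: t)
              = (pre ++ List.replicate k 1) ++ gfDecode ((v2, k2) :: t) := by simp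
          have e2 : pre.length + k = (pre ++ List.replicate k 1).length := by simp
          rw [e1, e2, ih hch' hpos' (pre ++ List.replicate k 1) (by simp [hne])
            (fun k3 _ => by rw [gfLastRep pre 1 k hk]; simp)]
          have e3 : gfFillGo g ((0, k) :: (v2, k2) :: t)
              = (1, k) :: gfFillGo g ((v2, k2) :: t) := by
            simp [gfFillGo, hkg]
          rw [e3, gfDecode_cons]
          simp
        · rw [gfBlock2_long g k pre (gfDecode ((v2, k2) :: t)) hne (hpre k rfl)
            (by rw [gfDecode_head v2 k2 t hk2]; simp; omega) (by omega)]
          have e1 : pre ++ List.replicate k 0 ++ gfDecode ((v2, k2) :: t)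
              = (pre ++ List.replicate k 0) ++ gfDecode ((v2, k2) :: t) := by simp
          have e2 : pre.length + k = (pre ++ List.replicate k 0).length := by simp
          rw [e1, e2, ih hch' hpos' (pre ++ List.replicate k 0) (by simp [hne])
            (fun k3 hh => by simp at hh; omega)]
          have e3 : gfFillGo g ((0, k) :: (v2, k2) :: t)
              = (0, k) :: gfFillGo g ((v2, k2) :: t) := by
            simp [gfFillGo, hkg]
          rw [e3, gfDecode_cons]
          simp
      · rw [gfBlock2_skip g k pre (gfDecode ((v2, k2) :: t)) v hv]
        have e1 : pre ++ List.replicate k v ++ gfDecode ((v2, k2) :: t)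
            = (pre ++ List.replicate k v) ++ gfDecode ((v2, k2) :: t) := by simp
        have e2 : pre.length + k = (pre ++ List.replicate k v).length := by simp
        rw [e1, e2, ih hch' hpos' (pre ++ List.replicate k v) (by simp [hne])
          (fun k3 _ => by rw [gfLastRep pre v k hk]; simp [hv])]
        have e3 : gfFillGo g ((v, k) :: (v2, k2) :: t)
            = (v, k) :: gfFillGo g ((v2, k2) :: t) := by
          simp [gfFillGo, hv]
        rw [e3, gfDecode_cons]
        simp
-- ---------- rle: decode, well-formedness, merge ----------

theorem gfRleGo_decode : ∀ (xs : List Int) (v : Int) (k : Nat),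
    gfDecode (gfRleGo v k xs) = List.replicate k v ++ xs := by
  intro xs
  induction xs with
  | nil => intro v k; simp [gfRleGo, gfDecode]
  | cons x xs ih =>
    intro v k
    by_cases hx : x = v
    · subst hx
      rw [gfRleGo, if_pos rfl, ih]
      simp [List.replicate_succ']
    · rw [gfRleGo, if_neg hx, gfDecode_cons, ih]
      simp [List.replicate_succ]

theorem gfDecode_rle (l : List Int) : gfDecode (gfRle l) = l := by
  cases l with
  | nil => rfl
  | cons x xs => rw [gfRle, gfRleGo_decode]; simp [List.replicate_succ]

theorem gfRleGo_head : ∀ (xs : List Int) (v : Int) (k : Nat),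
    ∃ k', (gfRleGo v k xs).head? = some (v, k') := by
  intro xs
  induction xs with
  | nil => intro v k; exact ⟨k, rfl⟩
  | cons x xs ih =>
    intro v k
    by_cases hx : x = v
    · subst hx; rw [gfRleGo, if_pos rfl]; exact ih _ _
    · rw [gfRleGo, if_neg hx]; exact ⟨k, rfl⟩

theorem gfRleGo_chain : ∀ (xs : List Int) (v : Int) (k : Nat),
    gfChain (gfRleGo v k xs) := by
  intro xs
  induction xs with
  | nil => intro v k; simp [gfRleGo, gfChain]
  | cons x xs ih =>
    intro v k
    by_cases hx : x = v
    · subst hx; rw [gfRleGo, if_pos rfl]; exact ih _ _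
    · rw [gfRleGo, if_neg hx]
      obtain ⟨k', hk'⟩ := gfRleGo_head xs x 1
      unfold gfChain
      rw [List.isChain_cons]
      refine ⟨fun y hy => ?_, ih _ _⟩
      rw [hk'] at hy
      simp at hy
      subst hy
      intro h
      simp at h
      exact hx h.symm

theorem gfRleGo_pos : ∀ (xs : List Int) (v : Int) (k : Nat), k ≠ 0 →
    gfPos (gfRleGo v k xs) := by
  intro xs
  induction xs with
  | nil => intro v k hk; intro r hr; simp [gfRleGo] at hr; simp [hr, hk]
  | cons x xs ih =>
    intro v k hk
    by_cases hx : x = v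
    · subst hx; rw [gfRleGo, if_pos rfl]; exact ih _ _ (by omega)
    · rw [gfRleGo, if_neg hx]
      intro r hr
      rcases List.mem_cons.mp hr with rfl | hr
      · simpa using hk
      · exact ih _ _ (by omega) r hr

theorem gfRle_chain (l : List Int) : gfChain (gfRle l) := by
  cases l with
  | nil => simp [gfRle, gfChain]
  | cons x xs => exact gfRleGo_chain xs x 1

theorem gfRle_pos (l : List Int) : gfPos (gfRle l) := by
  cases l with
  | nil => intro r hr; simp [gfRle] at hr
  | cons x xs => exact gfRleGo_pos xs x 1 (by omega)

theorem gfRleGo_replicate : ∀ (m : Nat) (xs : List Int) (v : Int) (k : Nat),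
    gfRleGo v k (List.replicate m v ++ xs) = gfRleGo v (k + m) xs := by
  intro m
  induction m with
  | zero => intro xs v k; simp
  | succ m ih =>
    intro xs v k
    rw [List.replicate_succ, List.cons_append, gfRleGo, if_pos rfl, ih]
    have e : k + 1 + m = k + (m + 1) := by omega
    rw [e]

theorem gfMergeGo_correct : ∀ (rs : List (Int × Nat)), gfPos rs →
    ∀ (v : Int) (k : Nat), gfRleGo v k (gfDecode rs) = gfMergeGo v k rs := by
  intro rs
  induction rs with
  | nil => intro _ v k; rfl
  | cons r rest ih =>
    obtain ⟨w, m⟩ := r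
    intro hpos v k
    have hm : m ≠ 0 := hpos (w, m) (List.mem_cons_self)
    have hpos' : gfPos rest := fun r hr => hpos r (List.mem_cons_of_mem _ hr)
    rw [gfDecode_cons]
    by_cases hw : w = v
    · subst hw
      rw [gfRleGo_replicate, ih hpos', gfMergeGo]
      rw [if_pos rfl]
    · obtain ⟨m', rfl⟩ : ∃ m', m = m' + 1 := ⟨m - 1, by omega⟩
      rw [List.replicate_succ, List.cons_append, gfRleGo, if_neg hw]
      rw [gfRleGo_replicate, ih hpos', gfMergeGo]
      simp [hw]
      have e : 1 + m' = m' + 1 := by omega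
      rw [e]
  
theorem gfMerge_correct (rs : List (Int × Nat)) (hpos : gfPos rs) :
    gfRle (gfDecode rs) = gfMerge rs := by
  cases rs with
  | nil => rfl
  | cons r rest =>
    obtain ⟨w, m⟩ := r
    have hm : m ≠ 0 := hpos (w, m) (List.mem_cons_self)
    have hpos' : gfPos rest := fun r hr => hpos r (List.mem_cons_of_mem _ hr)
    obtain ⟨m', rfl⟩ : ∃ m', m = m' + 1 := ⟨m - 1, by omega⟩
    rw [gfDecode_cons, List.replicate_succ, List.cons_append, gfRle,
      gfRleGo_replicate, gfMergeGo_correct rest hpos', gfMerge]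
    have e : 1 + m' = m' + 1 := by omega
    rw [e]

theorem gfDrop_pos (g : Int) (rs : List (Int × Nat)) (hpos : gfPos rs) :
    gfPos (gfDrop g rs) := by
  intro r hr
  simp only [gfDrop, List.mem_map] at hr
  obtain ⟨⟨a, b⟩, hab, hr⟩ := hr
  have hb := hpos (a, b) hab
  rw [← hr]
  split <;> simpa using hb

theorem gfDrop_id (g : Int) (rs : List (Int × Nat)) (hg : g ≤ 0) (hpos : gfPos rs) :
    gfDrop g rs = rs := by
  unfold gfDrop
  rw [List.map_eq_iff]
  intro i
  cases hri : rs[i]? with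
  | none => simp
  | some r =>
    have hr : r ∈ rs := List.mem_of_getElem? hri
    have := hpos r hr
    simp
    intro h1 h2
    exfalso
    omega

theorem gfFillGo_cons2 (g : Int) (r r2 : Int × Nat) (t : List (Int × Nat)) :
    gfFillGo g (r :: r2 :: t)
      = (if r.1 = 0 ∧ (r.2 : Int) ≤ g then (1, r.2) else r) :: gfFillGo g (r2 :: t) := rfl

theorem gfFill_cons (g : Int) (r : Int × Nat) (rest : List (Int × Nat)) :
    gfFill g (r :: rest) = r :: gfFillGo g rest := rfl

theorem gfFillGo_id (g : Int) (hg : g ≤ 0) : ∀ (rs : List (Int × Nat)), gfPos rs →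
    gfFillGo g rs = rs := by
  intro rs
  induction rs with
  | nil => intro _; rfl
  | cons r rest ih =>
    intro hpos
    cases rest with
    | nil => rfl
    | cons r2 t =>
      have hr : r.2 ≠ 0 := hpos r (List.mem_cons_self)
      rw [gfFillGo_cons2, ih (fun x hx => hpos x (List.mem_cons_of_mem _ hx))]
      rw [if_neg (by intro h; have := h.2; omega)]

-- ---------- assembling the two passes ----------

theorem gfPass1_top (g : Int) (l : List Int) :
    (List.range l.length).foldl (gfStep1 g) l = gfDecode (gfDrop g (gfRle l)) := by
  have h := gfPass1 g (gfRle l) (gfRle_chain l) (gfRle_pos l) [] (fun _ _ => by simp)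
  simp only [List.nil_append, List.length_nil] at h
  rw [gfDecode_rle] at h
  have hblk : gfBlk 0 l.length = List.range l.length := by
    simp [gfBlk]
  rw [hblk] at h
  exact h

theorem gfPass2_top (g : Int) (l : List Int) :
    (List.range l.length).foldl (gfStep2 g) l = gfDecode (gfFill g (gfRle l)) := by
  cases hrle : gfRle l with
  | nil =>
    have hl : l = [] := by
      have := gfDecode_rle l
      rw [hrle] at this
      simpa [gfDecode] using this.symm
    subst hl
    simp [gfFill, gfDecode]
  | cons r rest =>
    obtain ⟨v, k⟩ := r
    have hch : gfChain ((v, k) :: rest) := by rw [← hrle]; exact gfRle_chain l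
    have hpos : gfPos ((v, k) :: rest) := by rw [← hrle]; exact gfRle_pos l
    have hk : k ≠ 0 := hpos (v, k) (List.mem_cons_self)
    have hl : l = List.replicate k v ++ gfDecode rest := by
      have := gfDecode_rle l
      rw [hrle, gfDecode_cons] at this
      exact this.symm
    have hlen : l.length = k + (gfDecode rest).length := by rw [hl]; simp
    have hrange : List.range l.length
        = gfBlk 0 k ++ gfBlk (0 + k) (gfDecode rest).length := by
      rw [← gfBlk_add]
      rw [hlen]
      simp [gfBlk]
    rw [hrange, List.foldl_append]
    have hfirst : (gfBlk 0 k).foldl (gfStep2 g) l = l := by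
      by_cases hv : v = 0
      · subst hv
        rw [hl]
        exact gfBlock2_start g k (gfDecode rest)
      · rw [hl]
        have h := gfBlock2_skip g k [] (gfDecode rest) v hv
        simpa using h
    rw [hfirst]
    have hpre : 0 + k = (List.replicate k v).length := by simp
    have h2 := gfPass2 g rest (List.IsChain.of_cons hch)
      (fun r hr => hpos r (List.mem_cons_of_mem _ hr))
      (List.replicate k v) (by simp [hk])
      (fun k2 hh => by
        cases rest with
        | nil => simp at hh
        | cons r2 t =>
          obtain ⟨v2, k2'⟩ := r2
          simp at hh
          have hv2 : v ≠ v2 := (List.isChain_cons_cons.mp hch).1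
          have hl2 := gfLastRep [] v k hk
          simp only [List.nil_append] at hl2
          rw [hl2]
          simp only [ne_eq, Option.some.injEq]
          intro hv0
          rw [← hh.1] at hv0
          exact hv2 hv0)
    rw [hpre, hl]
    rw [h2]
    rw [gfFill, gfDecode_cons]

-- ---------- the main equivalence ----------

theorem gfMain (l : List Int) (g : Int) : gap_fill l g = gap_fill_alt l g := by
  by_cases hg : g = 0
  · subst hg
    rw [gap_fill, if_pos rfl]
    show l = gap_fill_alt l 0
    show l = gfDecode (gfFill 0 (gfMerge (gfDrop 0 (gfRle l))))
    rw [gfDrop_id 0 _ (by omega) (gfRle_pos l),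
      ← gfMerge_correct (gfRle l) (gfRle_pos l), gfDecode_rle]
    cases hrle : gfRle l with
    | nil =>
      have hl : l = [] := by
        have h := gfDecode_rle l
        rw [hrle] at h
        simpa [gfDecode] using h.symm
      rw [hl]
      rfl
    | cons r rest =>
      have hpos : gfPos (r :: rest) := by rw [← hrle]; exact gfRle_pos l
      rw [gfFill_cons, gfFillGo_id 0 (by omega) rest
        (fun x hx => hpos x (List.mem_cons_of_mem _ hx))]
      have hdec : gfDecode (r :: rest) = l := by rw [← hrle]; exact gfDecode_rle l
      exact hdec.symm
  · rw [gap_fill, if_neg hg]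
    show (List.range ((List.range l.length).foldl (gfStep1 g) l).length).foldl (gfStep2 g)
        ((List.range l.length).foldl (gfStep1 g) l) = _
    rw [gfPass1_top, gfPass2_top]
    rw [gfMerge_correct (gfDrop g (gfRle l)) (gfDrop_pos g (gfRle l) (gfRle_pos l))]
    rfl

-- ===== VERDICT (by name: the statement is the Claim_ definition above) =====
theorem gap_fill_spec : Claim_equal_gap_fill := by
  intro chain_pred g _
  unfold Spec_gap_fill
  exact gfMain chain_pred g
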